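-- pv_equiv track=rewrite | github.com/anmawxz/compiladores | av2/testebr.py | gerar_combinacoes
-- ===== SOURCE A (Python) =====
-- def gerar_combinacoes(regra, anulaveis):
--     combinacoes = ['']
--
--     for simbolo in regra:
--         if simbolo in anulaveis:
--             novas_combinacoes = []
--
--             for combinacao in combinacoes:
--                 novas_combinacoes.append(combinacao + simbolo)
--                 novas_combinacoes.append(combinacao)
--
--             combinacoes = novas_combinacoes
--         else:
--             combinacoes = [combinacao + simbolo for combinacao in combinacoes]
--
--     return combinacoes
-- ===== SOURCE B (Python) =====
-- def gerar_combinacoes(regra, anulaveis):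
--     nullable = [s in anulaveis for s in regra]
--     k = sum(nullable)
--     result = []
--     for mask in range(2 ** k - 1, -1, -1):
--         m = mask
--         r = k
--         parts = []
--         for s, is_n in zip(regra, nullable):
--             if is_n:
--                 r -= 1
--                 if m >= 2 ** r:
--                     m -= 2 ** r
--                     parts.append(s)
--             else:
--                 parts.append(s)
--         result.append(''.join(parts))
--     return result
-- ===== Notes on version B (the rewrite author's own statement) =====
-- stated objective: alternative
-- what changed: Replaces the incremental list-doubling over prefixes by direct enumeration of subset masks, counting the nullable positions once and building each output string independently from a descending mask.
import Mathlib
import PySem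

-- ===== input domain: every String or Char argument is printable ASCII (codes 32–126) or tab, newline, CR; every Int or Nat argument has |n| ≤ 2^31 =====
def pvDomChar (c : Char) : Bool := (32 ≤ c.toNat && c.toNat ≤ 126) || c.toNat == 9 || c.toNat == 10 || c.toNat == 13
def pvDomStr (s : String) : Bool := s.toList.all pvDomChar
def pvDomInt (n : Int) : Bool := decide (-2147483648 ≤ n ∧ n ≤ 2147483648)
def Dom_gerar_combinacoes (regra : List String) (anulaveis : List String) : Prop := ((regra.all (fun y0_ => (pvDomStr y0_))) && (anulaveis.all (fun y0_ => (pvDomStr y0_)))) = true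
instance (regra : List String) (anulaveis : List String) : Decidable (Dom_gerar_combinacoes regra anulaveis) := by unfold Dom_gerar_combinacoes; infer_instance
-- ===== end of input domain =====

-- B enumerates the subset masks directly instead of A's incremental list doubling; same cost, different algorithm.

-- ===== PORT A =====
def gerar_combinacoes (regra : List String) (anulaveis : List String) : List String :=
  regra.foldl (fun combinacoes simbolo =>
    if anulaveis.contains simbolo then
      combinacoes.foldl (fun novas c => novas ++ [c ++ simbolo, c]) ([] : List String)
    else
      combinacoes.map (fun c => c ++ simbolo)) [""]

-- ===== PORT B =====
-- ''.join(parts)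
def pvJoin (parts : List String) : String := parts.foldl (· ++ ·) ""

-- one step of B's inner loop over (symbol, is_nullable); state = (m, r, parts).
-- m and r are kept as Nat: in Source B they are nonnegative throughout (m < 2^r, r ≥ 1 before each decrement).
def pvStep (st : Nat × Nat × List String) (p : String × Bool) : Nat × Nat × List String :=
  if p.2 then
    if 2 ^ (st.2.1 - 1) ≤ st.1 then (st.1 - 2 ^ (st.2.1 - 1), st.2.1 - 1, st.2.2 ++ [p.1])
    else (st.1, st.2.1 - 1, st.2.2)
  else (st.1, st.2.1, st.2.2 ++ [p.1])

def gerar_combinacoes_alt (regra : List String) (anulaveis : List String) : List String :=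
  let nullable := regra.map (fun s => anulaveis.contains s)
  let k := nullable.count true
  -- range(2**k - 1, -1, -1) ported as (List.range (2^k)).reverse
  (List.range (2 ^ k)).reverse.map (fun mask =>
    pvJoin ((regra.zip nullable).foldl pvStep (mask, k, [])).2.2)

-- ===== PRECONDITION & SPEC =====
def Spec_gerar_combinacoes (regra : List String) (anulaveis : List String) (out : List String) : Prop := out = gerar_combinacoes_alt regra anulaveis
instance (regra : List String) (anulaveis : List String) (out : List String) : Decidable (Spec_gerar_combinacoes regra anulaveis out) := by unfold Spec_gerar_combinacoes; infer_instance

-- ===== CLAIM (what is proved, stated in full; the proofs are below) =====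
def Claim_equal_gerar_combinacoes : Prop := ∀ (regra : List String) (anulaveis : List String), Dom_gerar_combinacoes regra anulaveis → Spec_gerar_combinacoes regra anulaveis (gerar_combinacoes regra anulaveis)

-- ===== LEMMAS AND PROOFS =====

-- Common recursive characterisation of both programs.
def pvBuild (an : List String) : List String → List String
  | [] => [""]
  | s :: rest =>
    let t := pvBuild an rest
    if an.contains s then t.map (fun u => s ++ u) ++ t else t.map (fun u => s ++ u)

lemma pvInnerFold (cs acc : List String) (s : String) :
    cs.foldl (fun novas c => novas ++ [c ++ s, c]) acc
      = acc ++ cs.flatMap (fun c => [c ++ s, c]) := by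
  induction cs generalizing acc with
  | nil => simp
  | cons c cs ih => simp [List.foldl, ih]

lemma pvA_invariant (an : List String) (regra cs : List String) :
    regra.foldl (fun combinacoes simbolo =>
      if an.contains simbolo then
        combinacoes.foldl (fun novas c => novas ++ [c ++ simbolo, c]) ([] : List String)
      else
        combinacoes.map (fun c => c ++ simbolo)) cs
    = cs.flatMap (fun c => (pvBuild an regra).map (fun u => c ++ u)) := by
  induction regra generalizing cs with
  | nil => simp [pvBuild]
  | cons s rest ih =>
    simp only [List.foldl]
    by_cases h : an.contains s
    · rw [if_pos h, ih, pvInnerFold]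
      simp only [pvBuild, if_pos h, List.nil_append]
      rw [List.flatMap_assoc]
      congr 1; funext c
      simp [String.append_assoc, Function.comp_def]
    · rw [if_neg h, ih]
      simp only [pvBuild, if_neg h]
      rw [List.flatMap_map]
      congr 1; funext c
      simp [String.append_assoc, Function.comp_def]

lemma pvA_eq_build (regra an : List String) :
    gerar_combinacoes regra an = pvBuild an regra := by
  rw [gerar_combinacoes, pvA_invariant]
  simp

-- the parts component of B's fold is appended-to only
lemma pvStep_parts (pairs : List (String × Bool)) (m r : Nat) (p : List String) :
    (pairs.foldl pvStep (m, r, p)).2.2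
      = p ++ (pairs.foldl pvStep (m, r, [])).2.2 ∧
    (pairs.foldl pvStep (m, r, p)).1 = (pairs.foldl pvStep (m, r, [])).1 ∧
    (pairs.foldl pvStep (m, r, p)).2.1 = (pairs.foldl pvStep (m, r, [])).2.1 := by
  induction pairs generalizing m r p with
  | nil => simp
  | cons q qs ih =>
    simp only [List.foldl, pvStep]
    by_cases hq : q.2
    · by_cases hm : 2 ^ (r - 1) ≤ m
      · simp only [hq, hm, if_pos]
        have h1 := ih (m - 2 ^ (r - 1)) (r - 1) (p ++ [q.1])
        have h2 := ih (m - 2 ^ (r - 1)) (r - 1) ([q.1])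
        simp [h1, h2]
      · simp only [hq, hm, if_false]
        exact ih m (r - 1) p
    · simp only [hq]
      have h1 := ih m r (p ++ [q.1])
      have h2 := ih m r ([q.1])
      simp [h1, h2]

lemma pvJoin_cons (s : String) (ps : List String) :
    pvJoin (s :: ps) = s ++ pvJoin ps := by
  have : ∀ (l : List String) (a : String), l.foldl (· ++ ·) a = a ++ pvJoin l := by
    intro l
    induction l with
    | nil => intro a; simp [pvJoin]
    | cons x xs ih =>
      intro a
      simp only [List.foldl, pvJoin] at *
      rw [ih (a ++ x), ih (("" : String) ++ x)]
      simp [String.append_assoc]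
  simp only [pvJoin, List.foldl]
  rw [this ps (("" : String) ++ s)]
  simp [pvJoin]

-- B's inner string builder, as a function of the zipped pairs
def pvStr (pairs : List (String × Bool)) (m k : Nat) : String :=
  pvJoin ((pairs.foldl pvStep (m, k, [])).2.2)

lemma pvStr_cons_false (s : String) (pairs : List (String × Bool)) (m k : Nat) :
    pvStr ((s, false) :: pairs) m k = s ++ pvStr pairs m k := by
  simp only [pvStr, List.foldl, pvStep, Bool.false_eq_true, if_false, List.nil_append]
  rw [(pvStep_parts pairs m k [s]).1, List.singleton_append, pvJoin_cons]

lemma pvStr_cons_true_hi (s : String) (pairs : List (String × Bool)) (m k : Nat)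
    (h : 2 ^ k ≤ m) :
    pvStr ((s, true) :: pairs) m (k + 1) = s ++ pvStr pairs (m - 2 ^ k) k := by
  simp only [pvStr, List.foldl, pvStep, if_true, Nat.add_sub_cancel, List.nil_append]
  rw [if_pos h, (pvStep_parts pairs (m - 2 ^ k) k [s]).1, List.singleton_append, pvJoin_cons]

lemma pvStr_cons_true_lo (s : String) (pairs : List (String × Bool)) (m k : Nat)
    (h : ¬ 2 ^ k ≤ m) :
    pvStr ((s, true) :: pairs) m (k + 1) = pvStr pairs m k := by
  simp only [pvStr, List.foldl, pvStep, if_true, Nat.add_sub_cancel]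
  rw [if_neg h]

lemma pvB_eq_build (an : List String) (regra : List String) :
    (List.range (2 ^ ((regra.map (fun s => an.contains s)).count true))).reverse.map
      (fun mask => pvStr (regra.zip (regra.map (fun s => an.contains s))) mask
        ((regra.map (fun s => an.contains s)).count true))
    = pvBuild an regra := by
  induction regra with
  | nil => simp [pvBuild, pvStr, pvJoin]
  | cons s rest ih =>
    by_cases h : an.contains s
    · have hmem : s ∈ an := by simpa using h
      have hk : ((s :: rest).map (fun x => an.contains x)).count true
          = ((rest.map (fun x => an.contains x)).count true) + 1 := by
        simp [hmem]
      set k := (rest.map (fun x => an.contains x)).count true with hkdef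
      have hpairs : (s :: rest).zip ((s :: rest).map (fun x => an.contains x))
          = (s, true) :: rest.zip (rest.map (fun x => an.contains x)) := by
        simp [hmem]
      rw [hk]
      have hsplit : List.range (2 ^ (k + 1)) =
          List.range (2 ^ k) ++ (List.range (2 ^ k)).map (fun m => 2 ^ k + m) := by
        rw [pow_succ, Nat.mul_two, List.range_add]
      rw [hsplit, List.reverse_append, List.map_append]
      simp only [pvBuild, if_pos h]
      congr 1
      · rw [← ih]
        simp only [List.map_reverse, List.map_map]
        congr 1
        apply List.map_congr_left
        intro m _
        simp only [Function.comp_def]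
        rw [hpairs, pvStr_cons_true_hi s _ _ _ (Nat.le_add_right _ _),
          Nat.add_sub_cancel_left]
      · rw [← ih]
        apply List.map_congr_left
        intro m hm
        have hm' : m < 2 ^ k := by simpa using hm
        rw [hpairs, pvStr_cons_true_lo _ _ _ _ (by omega)]
    · have hf : an.contains s = false := by simpa using h
      have hmem : s ∉ an := by simpa using hf
      have hk : ((s :: rest).map (fun x => an.contains x)).count true
          = ((rest.map (fun x => an.contains x)).count true) := by
        simp [hmem]
      have hpairs : (s :: rest).zip ((s :: rest).map (fun x => an.contains x))
          = (s, false) :: rest.zip (rest.map (fun x => an.contains x)) := by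
        simp [hmem]
      rw [hk]
      simp only [pvBuild, if_neg h]
      rw [← ih]
      simp only [List.map_reverse, List.map_map]
      congr 1
      apply List.map_congr_left
      intro m _
      simp only [Function.comp_def]
      rw [hpairs, pvStr_cons_false]

-- ===== VERDICT (by name: the statement is the Claim_ definition above) =====
theorem gerar_combinacoes_spec : Claim_equal_gerar_combinacoes := by
  intro regra anulaveis _
  unfold Spec_gerar_combinacoes gerar_combinacoes_alt
  simp only []
  rw [pvA_eq_build, ← pvB_eq_build anulaveis regra]
  rfl
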